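-- pv_equiv track=rewrite | github.com/nicholasjayantylearns/shut-the-dux-up | features/steps/fit_template_magnet_steps.py | _object_matches_criteria
-- ===== SOURCE A (Python) =====
-- from typing import Dict, List, Any
--
-- def _object_matches_criteria(obj: Dict[str, Any], problem_scope: str,
--                             behavior_constraints: List[str], result_requirements: List[str]) -> bool:
--     """Check if an object matches the magnet criteria"""
--     obj_type = obj.get('object_type', '')
--
--     # Basic matching logic - would be enhanced with LLM-based semantic matching
--     if obj_type == 'Problem' and problem_scope:
--         return problem_scope.lower() in obj.get('description', '').lower()
--     elif obj_type == 'Behavior' and behavior_constraints: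
--         return any(constraint.lower() in obj.get('description', '').lower()
--                   for constraint in behavior_constraints)
--     elif obj_type == 'Result' and result_requirements:
--         return any(req.lower() in obj.get('description', '').lower()
--                   for req in result_requirements)
--
--     return False
-- ===== SOURCE B (Python) =====
-- def _object_matches_criteria(obj, problem_scope, behavior_constraints, result_requirements):
--     """Check if an object matches the magnet criteria.
--
--     Flattens all criteria into one tagged (kind, term) candidate list and scans it
--     with a single early-exit loop, filtering by the object's type inside the scan."""
--     desc = obj.get('description', '').lower()
--     obj_type = obj.get('object_type', '')
--
--     candidates = ([('Problem', problem_scope)] if problem_scope else []) \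
--         + [('Behavior', c) for c in behavior_constraints] \
--         + [('Result', r) for r in result_requirements]
--
--     i = 0
--     while i < len(candidates):
--         kind, term = candidates[i]
--         if kind == obj_type and term.lower() in desc:
--             return True
--         i += 1
--     return False
-- ===== Notes on version B (the rewrite author's own statement) =====
-- stated objective: alternative
-- what changed: Replaces the per-type if/elif branches (each with its own membership test over its own list) by flattening all criteria into one tagged (kind, term) candidate list and a single recursive early-exit scan that filters by the object's type per element.
import Mathlib
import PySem

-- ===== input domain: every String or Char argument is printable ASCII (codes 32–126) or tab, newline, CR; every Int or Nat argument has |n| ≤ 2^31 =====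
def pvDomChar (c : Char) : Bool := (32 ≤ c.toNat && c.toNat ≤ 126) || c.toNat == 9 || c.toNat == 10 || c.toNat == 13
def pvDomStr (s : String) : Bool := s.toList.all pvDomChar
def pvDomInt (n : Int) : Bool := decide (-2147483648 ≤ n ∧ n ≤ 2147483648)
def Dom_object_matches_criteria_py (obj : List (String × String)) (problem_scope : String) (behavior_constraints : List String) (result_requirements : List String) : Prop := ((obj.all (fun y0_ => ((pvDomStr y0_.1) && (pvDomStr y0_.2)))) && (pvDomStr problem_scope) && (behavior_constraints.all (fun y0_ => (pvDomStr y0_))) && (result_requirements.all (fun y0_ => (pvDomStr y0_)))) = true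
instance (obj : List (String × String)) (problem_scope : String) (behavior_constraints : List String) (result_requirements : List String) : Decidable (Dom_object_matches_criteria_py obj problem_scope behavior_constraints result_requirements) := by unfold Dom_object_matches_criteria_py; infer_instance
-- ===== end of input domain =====

-- B flattens all criteria into one tagged (kind, term) list and scans it with
-- a single early-exit loop, instead of A's per-type if/elif branches (objective: alternative).
-- ===== PORT A =====
def object_matches_criteria_py (obj : List (String × String)) (problem_scope : String) (behavior_constraints : List String) (result_requirements : List String) : Bool :=
  let d := PySem.Dict.ofList obj
  let objType := d.getD "object_type" ""
  if objType = "Problem" ∧ problem_scope ≠ "" then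
    PySem.Str.isIn (PySem.Str.lower problem_scope) (PySem.Str.lower (d.getD "description" ""))
  else if objType = "Behavior" ∧ behavior_constraints ≠ [] then
    behavior_constraints.any (fun c => PySem.Str.isIn (PySem.Str.lower c) (PySem.Str.lower (d.getD "description" "")))
  else if objType = "Result" ∧ result_requirements ≠ [] then
    result_requirements.any (fun r => PySem.Str.isIn (PySem.Str.lower r) (PySem.Str.lower (d.getD "description" "")))
  else
    false

-- ===== PORT B =====
-- early-exit scan of the tagged candidate list (Source B's while loop, as structural recursion)
def omcScan (objType desc : String) : List (String × String) → Bool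
  | [] => false
  | (kind, term) :: rest =>
    if kind = objType ∧ PySem.Str.isIn (PySem.Str.lower term) desc then true
    else omcScan objType desc rest

def object_matches_criteria_py_alt (obj : List (String × String)) (problem_scope : String) (behavior_constraints : List String) (result_requirements : List String) : Bool :=
  let d := PySem.Dict.ofList obj
  let desc := PySem.Str.lower (d.getD "description" "")
  let objType := d.getD "object_type" ""
  let candidates :=
    (if problem_scope ≠ "" then [("Problem", problem_scope)] else [])
      ++ behavior_constraints.map (fun c => ("Behavior", c))
      ++ result_requirements.map (fun r => ("Result", r))
  omcScan objType desc candidates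

-- ===== PRECONDITION & SPEC =====
def Spec_object_matches_criteria_py (obj : List (String × String)) (problem_scope : String) (behavior_constraints : List String) (result_requirements : List String) (out : Bool) : Prop := out = object_matches_criteria_py_alt obj problem_scope behavior_constraints result_requirements
instance (obj : List (String × String)) (problem_scope : String) (behavior_constraints : List String) (result_requirements : List String) (out : Bool) : Decidable (Spec_object_matches_criteria_py obj problem_scope behavior_constraints result_requirements out) := by unfold Spec_object_matches_criteria_py; infer_instance

-- ===== CLAIM (what is proved, stated in full; the proofs are below) =====
def Claim_equal_object_matches_criteria_py : Prop := ∀ (obj : List (String × String)) (problem_scope : String) (behavior_constraints : List String) (result_requirements : List String), Dom_object_matches_criteria_py obj problem_scope behavior_constraints result_requirements → Spec_object_matches_criteria_py obj problem_scope behavior_constraints result_requirements (object_matches_criteria_py obj problem_scope behavior_constraints result_requirements)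

-- ===== LEMMAS AND PROOFS =====
theorem omcScan_append (objType desc : String) (l₁ l₂ : List (String × String)) :
    omcScan objType desc (l₁ ++ l₂) = (omcScan objType desc l₁ || omcScan objType desc l₂) := by
  induction l₁ with
  | nil => simp [omcScan]
  | cons p rest ih =>
    obtain ⟨kind, term⟩ := p
    simp only [List.cons_append, omcScan]
    split
    · simp
    · exact ih

theorem omcScan_map_tag (objType desc tag : String) (l : List String) :
    omcScan objType desc (l.map (fun t => (tag, t)))
      = if tag = objType then l.any (fun t => PySem.Str.isIn (PySem.Str.lower t) desc) else false := by
  induction l with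
  | nil => simp [omcScan]
  | cons t rest ih =>
    by_cases htag : tag = objType
    · subst htag
      simp only [List.map_cons, omcScan, ih]
      by_cases hin : PySem.Str.isIn (PySem.Str.lower t) desc <;> simp
    · simp [omcScan, htag, ih]

theorem omcScan_head (objType desc ps : String) :
    omcScan objType desc (if ps ≠ "" then [("Problem", ps)] else [])
      = if objType = "Problem" ∧ ps ≠ "" then PySem.Str.isIn (PySem.Str.lower ps) desc else false := by
  by_cases hps : ps = ""
  · simp [hps, omcScan]
  · by_cases h : objType = "Problem"
    · subst h
      by_cases hin : PySem.Str.isIn (PySem.Str.lower ps) desc <;> simp [hps, omcScan]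
    · simp [hps, omcScan, h, Ne.symm h]

theorem scan_eq_branches (objType desc ps : String) (bc rr : List String) :
    omcScan objType desc
      ((if ps ≠ "" then [("Problem", ps)] else [])
        ++ bc.map (fun c => ("Behavior", c))
        ++ rr.map (fun r => ("Result", r)))
    = (if objType = "Problem" ∧ ps ≠ "" then
        PySem.Str.isIn (PySem.Str.lower ps) desc
      else if objType = "Behavior" ∧ bc ≠ [] then
        bc.any (fun c => PySem.Str.isIn (PySem.Str.lower c) desc)
      else if objType = "Result" ∧ rr ≠ [] then
        rr.any (fun r => PySem.Str.isIn (PySem.Str.lower r) desc)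
      else false) := by
  rw [omcScan_append, omcScan_append, omcScan_head, omcScan_map_tag, omcScan_map_tag]
  by_cases h1 : objType = "Problem"
  · subst h1
    by_cases hps : ps = "" <;>
      simp [hps, show ("Behavior" : String) ≠ "Problem" from by decide,
        show ("Result" : String) ≠ "Problem" from by decide]
  · by_cases h2 : objType = "Behavior"
    · subst h2
      cases bc <;>
        simp [h1, show ("Result" : String) ≠ "Behavior" from by decide]
    · by_cases h3 : objType = "Result"
      · subst h3
        cases rr <;>
          simp [h1, h2, show ("Behavior" : String) ≠ "Result" from by decide]
      · simp [h1, h2, h3, Ne.symm h2, Ne.symm h3]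

-- ===== VERDICT (by name: the statement is the Claim_ definition above) =====
theorem object_matches_criteria_py_spec : Claim_equal_object_matches_criteria_py := by
  intro obj ps bc rr _
  show object_matches_criteria_py obj ps bc rr = object_matches_criteria_py_alt obj ps bc rr
  unfold object_matches_criteria_py object_matches_criteria_py_alt
  exact (scan_eq_branches ((PySem.Dict.ofList obj).getD "object_type" "")
    (PySem.Str.lower ((PySem.Dict.ofList obj).getD "description" "")) ps bc rr).symm
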